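-- pv_equiv track=rewrite | github.com/HellOwhatAs/Leetcode | 1053.交换一次的先前排列.py | prevPermOpt1
-- ===== SOURCE A (Python) =====
-- from typing import List
--
-- def prevPermOpt1(arr: List[int]) -> List[int]:
--     n = len(arr)
--     for i in reversed(range(n - 1)):
--         if arr[i] > arr[i + 1]:
--             j = n - 1
--             while arr[j] >= arr[i] or arr[j] == arr[j - 1]:
--                 j -= 1
--             arr[i], arr[j] = arr[j], arr[i]
--             break
--     return arr
-- ===== SOURCE B (Python) =====
-- from typing import List
--
-- def prevPermOpt1(arr: List[int]) -> List[int]: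
--     # Mutates arr in place like the original (same swap), return value proved equal.
--     n = len(arr)
--     i = None
--     for k in range(n - 1):          # forward pass: remember the LAST descent
--         if arr[k] > arr[k + 1]:
--             i = k
--     if i is None:
--         return arr
--     best = i + 1                    # arr[i+1] < arr[i] always qualifies
--     for j in range(i + 2, n):       # forward pass over the suffix: leftmost max below arr[i]
--         if arr[i] > arr[j] > arr[best]:
--             best = j
--     arr[i], arr[best] = arr[best], arr[i]
--     return arr
-- ===== Notes on version B (the rewrite author's own statement) =====
-- stated objective: alternative
-- what changed: Replaces A's backward break-loop search for the descent and its backward sentinel while-loop by two forward passes with accumulators: one forward scan remembering the last descent index, then one forward scan over the suffix tracking the leftmost index of the maximum value below arr[i].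
import Mathlib
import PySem

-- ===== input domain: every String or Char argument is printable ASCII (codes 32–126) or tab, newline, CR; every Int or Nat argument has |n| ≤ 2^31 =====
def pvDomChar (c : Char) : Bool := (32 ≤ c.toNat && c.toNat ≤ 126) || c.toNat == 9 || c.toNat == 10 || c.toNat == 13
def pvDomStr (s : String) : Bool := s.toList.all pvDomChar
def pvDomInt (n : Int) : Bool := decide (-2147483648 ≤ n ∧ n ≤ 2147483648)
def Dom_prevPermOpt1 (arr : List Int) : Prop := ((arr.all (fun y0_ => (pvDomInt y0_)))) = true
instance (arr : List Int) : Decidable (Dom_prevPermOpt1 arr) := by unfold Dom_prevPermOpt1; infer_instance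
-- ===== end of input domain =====

-- B replaces A's backward break-loop and backward sentinel while-loop by two forward passes with
-- accumulators (same O(n) cost, different decomposition). Both Pythons mutate arr in place with the
-- same single swap; the equivalence proved here is about the RETURN value.

-- ===== PORT A =====
-- arr[i], arr[j] = arr[j], arr[i]  (shared by both ports; both Pythons have this identical line)
def pySwap (arr : List Int) (i j : Nat) : List Int :=
  (arr.set i (arr.getD j 0)).set j (arr.getD i 0)

-- while arr[j] >= t or arr[j] == arr[j-1]: j -= 1 ; returns final j.
-- The j = 0 base is never reached from prevPermOpt1 (the loop provably stops at j ≥ i+1 ≥ 1,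
-- so arr[j-1] never needs Python's negative-index wrap).
def whileJ (arr : List Int) (t : Int) : Nat → Nat
  | 0 => 0
  | j+1 =>
    if arr.getD (j+1) 0 ≥ t ∨ arr.getD (j+1) 0 = arr.getD j 0 then whileJ arr t j else j+1

-- for i in reversed(range(n-1)): if arr[i] > arr[i+1]: … break
def findA (arr : List Int) : Nat → List Int
  | 0 => arr
  | k+1 =>
    if arr.getD k 0 > arr.getD (k+1) 0 then
      pySwap arr k (whileJ arr (arr.getD k 0) (arr.length - 1))
    else findA arr k

def prevPermOpt1 (arr : List Int) : List Int := findA arr (arr.length - 1)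

-- ===== PORT B =====
-- forward pass: i = None; for k in range(n-1): if arr[k] > arr[k+1]: i = k
def findDesc (arr : List Int) : Option Nat :=
  (List.range (arr.length - 1)).foldl
    (fun acc k => if arr.getD k 0 > arr.getD (k+1) 0 then some k else acc) none

-- best = i+1; for j in range(i+2, n): if arr[i] > arr[j] > arr[best]: best = j
def bestJ (arr : List Int) (i : Nat) : Nat :=
  (List.range' (i+2) (arr.length - (i+2))).foldl
    (fun best j =>
      if arr.getD i 0 > arr.getD j 0 ∧ arr.getD j 0 > arr.getD best 0 then j else best)
    (i+1)

def prevPermOpt1_alt (arr : List Int) : List Int :=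
  match findDesc arr with
  | none => arr
  | some i => pySwap arr i (bestJ arr i)

-- ===== PRECONDITION & SPEC =====
def Spec_prevPermOpt1 (arr : List Int) (out : List Int) : Prop := out = prevPermOpt1_alt arr
instance (arr : List Int) (out : List Int) : Decidable (Spec_prevPermOpt1 arr out) := by unfold Spec_prevPermOpt1; infer_instance

-- ===== CLAIM (what is proved, stated in full; the proofs are below) =====
def Claim_equal_prevPermOpt1 : Prop := ∀ (arr : List Int), Dom_prevPermOpt1 arr → Spec_prevPermOpt1 arr (prevPermOpt1 arr)

-- ===== LEMMAS AND PROOFS =====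

-- proof-side name for B's first fold, with the bound generalized
def lastD (arr : List Int) (m : Nat) : Option Nat :=
  (List.range m).foldl
    (fun acc k => if arr.getD k 0 > arr.getD (k+1) 0 then some k else acc) none

theorem findDesc_eq (arr : List Int) : findDesc arr = lastD arr (arr.length - 1) := rfl

theorem lastD_succ (arr : List Int) (m : Nat) :
    lastD arr (m+1) =
      if arr.getD m 0 > arr.getD (m+1) 0 then some m else lastD arr m := by
  simp only [lastD, List.range_succ, List.foldl_append, List.foldl_cons, List.foldl_nil]

theorem lastD_some (arr : List Int) :
    ∀ {m i : Nat}, lastD arr m = some i →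
      i < m ∧ arr.getD i 0 > arr.getD (i+1) 0 ∧
      ∀ k, i < k → k < m → ¬(arr.getD k 0 > arr.getD (k+1) 0) := by
  intro m
  induction m with
  | zero => intro i h; simp [lastD] at h
  | succ m ih =>
    intro i h
    rw [lastD_succ] at h
    split_ifs at h with hd
    · cases h
      exact ⟨Nat.lt_succ_self _, hd, fun k hk hk' => by omega⟩
    · obtain ⟨h1, h2, h3⟩ := ih h
      refine ⟨by omega, h2, fun k hk hk' => ?_⟩
      rcases Nat.lt_succ_iff_lt_or_eq.mp hk' with h' | h'
      · exact h3 k hk h'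
      · subst h'; exact hd

-- chained monotonicity of the suffix after the last descent
theorem mono_chain (arr : List Int) (i : Nat)
    (hm : ∀ k, i < k → k + 1 < arr.length → arr.getD k 0 ≤ arr.getD (k+1) 0) :
    ∀ d k, i < k → k + d < arr.length → arr.getD k 0 ≤ arr.getD (k+d) 0 := by
  intro d
  induction d with
  | zero => intro k _ _; simp
  | succ d ih =>
    intro k hk hkd
    have h1 : arr.getD k 0 ≤ arr.getD (k+d) 0 := ih k hk (by omega)
    have h2 : arr.getD (k+d) 0 ≤ arr.getD (k+d+1) 0 := hm (k+d) (by omega) (by omega)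
    calc arr.getD k 0 ≤ arr.getD (k+d) 0 := h1
      _ ≤ arr.getD (k + (d+1)) 0 := by rw [show k + (d+1) = k+d+1 by omega]; exact h2

-- B's second fold lands on a target (invariant carried forward)
theorem bestJ_fold (arr : List Int) (i : Nat)
    (hmono : ∀ k l, i < k → k ≤ l → l < arr.length → arr.getD k 0 ≤ arr.getD l 0) :
    ∀ (len m : Nat) (best : Nat), i + 2 ≤ m → m + len ≤ arr.length →
      (i+1 ≤ best ∧ best < m ∧ arr.getD best 0 < arr.getD i 0 ∧
        (∀ l, i+1 ≤ l → l < m → arr.getD l 0 < arr.getD i 0 → arr.getD l 0 ≤ arr.getD best 0) ∧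
        (∀ l, i+1 ≤ l → l < best → arr.getD l 0 < arr.getD best 0)) →
      (let r := (List.range' m len).foldl
        (fun best j =>
          if arr.getD i 0 > arr.getD j 0 ∧ arr.getD j 0 > arr.getD best 0 then j else best) best
       i+1 ≤ r ∧ r < m + len ∧ arr.getD r 0 < arr.getD i 0 ∧
        (∀ l, i+1 ≤ l → l < m + len → arr.getD l 0 < arr.getD i 0 → arr.getD l 0 ≤ arr.getD r 0) ∧
        (∀ l, i+1 ≤ l → l < r → arr.getD l 0 < arr.getD r 0)) := by
  intro len
  induction len with
  | zero =>
    intro m best _ _ hinv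
    simpa using hinv
  | succ len ih =>
    intro m best hm hlen hinv
    obtain ⟨hb1, hb2, hb3, hb4, hb5⟩ := hinv
    rw [List.range'_succ, List.foldl_cons]
    have hstep :
        let b' := if arr.getD i 0 > arr.getD m 0 ∧ arr.getD m 0 > arr.getD best 0 then m else best
        i+1 ≤ b' ∧ b' < m+1 ∧ arr.getD b' 0 < arr.getD i 0 ∧
          (∀ l, i+1 ≤ l → l < m+1 → arr.getD l 0 < arr.getD i 0 → arr.getD l 0 ≤ arr.getD b' 0) ∧
          (∀ l, i+1 ≤ l → l < b' → arr.getD l 0 < arr.getD b' 0) := by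
      split_ifs with hc
      · refine ⟨by omega, by omega, hc.1, ?_, ?_⟩
        · intro l hl1 hl2 hl3
          rcases Nat.lt_succ_iff_lt_or_eq.mp hl2 with h' | h'
          · have := hb4 l hl1 h' hl3; omega
          · subst h'; rfl
        · intro l hl1 hl2
          have hlT : arr.getD l 0 ≤ arr.getD m 0 :=
            hmono l m (by omega) (by omega) (by omega)
          have := hb4 l hl1 hl2 (by omega)
          omega
      · refine ⟨hb1, by omega, hb3, ?_, hb5⟩
        intro l hl1 hl2 hl3
        rcases Nat.lt_succ_iff_lt_or_eq.mp hl2 with h' | h'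
        · exact hb4 l hl1 h' hl3
        · subst h'; omega
    have := ih (m+1) _ (by omega) (by omega) hstep
    simpa [show m + 1 + len = m + (len+1) by omega] using this

-- A's while-loop stops at any target (downward structural recursion)
theorem whileJ_eq (arr : List Int) (i jt : Nat)
    (hmono : ∀ k l, i < k → k ≤ l → l < arr.length → arr.getD k 0 ≤ arr.getD l 0)
    (htgt : i+1 ≤ jt ∧ jt < arr.length ∧ arr.getD jt 0 < arr.getD i 0 ∧
      (∀ l, i+1 ≤ l → l < arr.length → arr.getD l 0 < arr.getD i 0 →
        arr.getD l 0 ≤ arr.getD jt 0) ∧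
      (∀ l, i+1 ≤ l → l < jt → arr.getD l 0 < arr.getD jt 0)) :
    ∀ j, jt ≤ j → j < arr.length → whileJ arr (arr.getD i 0) j = jt := by
  obtain ⟨h1, h2, h3, h4, h5⟩ := htgt
  intro j
  induction j with
  | zero => intro hj _; omega
  | succ j ih =>
    intro hj hjn
    rcases Nat.lt_succ_iff_lt_or_eq.mp (Nat.lt_succ_of_le hj) with hlt | heq
    · -- jt ≤ j : the continue-condition holds at j+1
      have hcond : arr.getD (j+1) 0 ≥ arr.getD i 0 ∨ arr.getD (j+1) 0 = arr.getD j 0 := by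
        by_cases hge : arr.getD (j+1) 0 ≥ arr.getD i 0
        · exact Or.inl hge
        · right
          have hj1 : arr.getD (j+1) 0 ≤ arr.getD jt 0 :=
            h4 (j+1) (by omega) hjn (by omega)
          have hjtj : arr.getD jt 0 ≤ arr.getD j 0 :=
            hmono jt j (by omega) (by omega) (by omega)
          have hjj1 : arr.getD j 0 ≤ arr.getD (j+1) 0 :=
            hmono j (j+1) (by omega) (by omega) hjn
          omega
      simp only [whileJ, hcond, if_pos]
      have := ih (by omega) (by omega)
      simpa [hcond]
    · -- jt = j+1 : the continue-condition fails
      subst heq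
      have hne : arr.getD (j+1) 0 ≠ arr.getD j 0 := by
        by_cases hji : j = i
        · subst hji; omega
        · have := h5 j (by omega) (by omega)
          omega
      simp only [whileJ]
      rw [if_neg]
      push Not
      exact ⟨by omega, hne⟩

-- ===== VERDICT (by name: the statement is the Claim_ definition above) =====
theorem prevPermOpt1_spec : Claim_equal_prevPermOpt1 := by
  intro arr _
  unfold Spec_prevPermOpt1 prevPermOpt1 prevPermOpt1_alt
  rw [findDesc_eq]
  -- main lemma: findA agrees with the lastD-dispatch
  have hfind : ∀ m, findA arr m =
      match lastD arr m with
      | none => arr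
      | some i => pySwap arr i (whileJ arr (arr.getD i 0) (arr.length - 1)) := by
    intro m
    induction m with
    | zero => rfl
    | succ m ih =>
      rw [lastD_succ]
      by_cases hd : arr.getD m 0 > arr.getD (m+1) 0
      · rw [if_pos hd]
        show (if arr.getD m 0 > arr.getD (m+1) 0 then
            pySwap arr m (whileJ arr (arr.getD m 0) (arr.length - 1))
          else findA arr m) = _
        rw [if_pos hd]
      · rw [if_neg hd, ← ih]
        show (if arr.getD m 0 > arr.getD (m+1) 0 then
            pySwap arr m (whileJ arr (arr.getD m 0) (arr.length - 1))
          else findA arr m) = _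
        rw [if_neg hd]
  rw [hfind]
  cases h : lastD arr (arr.length - 1) with
  | none => rfl
  | some i =>
    obtain ⟨hi, hdesc, hnod⟩ := lastD_some arr h
    have hn : 1 ≤ arr.length := by omega
    have hmono1 : ∀ k, i < k → k + 1 < arr.length → arr.getD k 0 ≤ arr.getD (k+1) 0 := by
      intro k hk hk1
      have := hnod k hk (by omega)
      omega
    have hmono : ∀ k l, i < k → k ≤ l → l < arr.length → arr.getD k 0 ≤ arr.getD l 0 := by
      intro k l hk hkl hl
      have := mono_chain arr i hmono1 (l - k) k hk (by omega)
      simpa [show k + (l - k) = l by omega] using this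
    -- B's result is a target
    have hinit : i+1 ≤ i+1 ∧ i+1 < i+2 ∧ arr.getD (i+1) 0 < arr.getD i 0 ∧
        (∀ l, i+1 ≤ l → l < i+2 → arr.getD l 0 < arr.getD i 0 →
          arr.getD l 0 ≤ arr.getD (i+1) 0) ∧
        (∀ l, i+1 ≤ l → l < i+1 → arr.getD l 0 < arr.getD (i+1) 0) := by
      refine ⟨le_refl _, by omega, by omega, ?_, ?_⟩
      · intro l hl1 hl2 _
        have : l = i+1 := by omega
        subst this; rfl
      · intro l hl1 hl2; omega
    have hB := bestJ_fold arr i hmono (arr.length - (i+2)) (i+2) (i+1)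
      (le_refl _) (by omega) hinit
    rw [show i + 2 + (arr.length - (i+2)) = arr.length by omega] at hB
    have hBdef : bestJ arr i = (List.range' (i+2) (arr.length - (i+2))).foldl
        (fun best j =>
          if arr.getD i 0 > arr.getD j 0 ∧ arr.getD j 0 > arr.getD best 0 then j else best)
        (i+1) := rfl
    rw [← hBdef] at hB
    -- A's while-loop stops at that same target
    have hA := whileJ_eq arr i (bestJ arr i) hmono hB (arr.length - 1)
      (by omega) (by omega)
    show pySwap arr i (whileJ arr (arr.getD i 0) (arr.length - 1)) = pySwap arr i (bestJ arr i)
    rw [hA]
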